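-- pv_equiv track=rewrite | github.com/CreativeLyons/mkdocTest | documentation/fix_issues.py | add_video
-- ===== SOURCE A (Python) =====
-- def add_video(content, video_id, video_type, depth):
--     """Add video div after author line"""
--     prefix = "../" * depth
--     video_div = f'<div class="video-container" data-video-id="{video_id}" data-video-type="{video_type}" data-thumbnail="{prefix}img/video-placeholder.jpg">\n</div>'
--
--     # Find author line
--     lines = content.split('\n')
--     new_lines = []
--     video_added = False
--
--     for i, line in enumerate(lines):
--         new_lines.append(line)
--         if line.startswith('**Author:**') and not video_added:
--             new_lines.append('')
--             new_lines.append(video_div)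
--             video_added = True
--
--     return '\n'.join(new_lines)
-- ===== SOURCE B (Python) =====
-- def add_video(content, video_id, video_type, depth):
--     """Add video div after author line: locate the first author line, then splice."""
--     prefix = "../" * depth
--     video_div = f'<div class="video-container" data-video-id="{video_id}" data-video-type="{video_type}" data-thumbnail="{prefix}img/video-placeholder.jpg">\n</div>'
--
--     lines = content.split('\n')
--     idx = next((i for i, l in enumerate(lines) if l.startswith('**Author:**')), None)
--     if idx is None:
--         return '\n'.join(lines)
--     return '\n'.join(lines[:idx + 1] + ['', video_div] + lines[idx + 1:])
-- ===== Notes on version B (the rewrite author's own statement) =====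
-- stated objective: simpler
-- what changed: Replaces A's append-every-line loop with a boolean flag by a locate-the-first-author-line-index step followed by a single slice-splice, with no loop state.
import Mathlib
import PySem

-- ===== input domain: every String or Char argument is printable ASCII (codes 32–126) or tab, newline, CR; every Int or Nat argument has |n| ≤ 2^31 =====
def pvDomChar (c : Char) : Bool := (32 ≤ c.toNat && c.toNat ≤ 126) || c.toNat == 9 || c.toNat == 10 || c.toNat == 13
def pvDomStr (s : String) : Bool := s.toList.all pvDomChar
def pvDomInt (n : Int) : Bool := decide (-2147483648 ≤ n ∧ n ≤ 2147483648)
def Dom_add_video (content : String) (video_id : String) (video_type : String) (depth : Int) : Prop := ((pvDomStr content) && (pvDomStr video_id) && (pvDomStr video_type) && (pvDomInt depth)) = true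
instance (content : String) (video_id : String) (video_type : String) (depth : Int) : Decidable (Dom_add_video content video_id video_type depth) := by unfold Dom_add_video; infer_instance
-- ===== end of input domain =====

-- B replaces A's flagged append-loop by find-first-author-index then one slice-splice (simpler decomposition, same O(n) cost).


-- shared by both ports: the f-string 'video_div' (identical literal line in both Pythons); exact on the domain
def pvVideoDiv (video_id : String) (video_type : String) (depth : Int) : String :=
  String.mk ("<div class=\"video-container\" data-video-id=\"".toList ++ video_id.toList
    ++ "\" data-video-type=\"".toList ++ video_type.toList
    ++ "\" data-thumbnail=\"".toList ++ PySem.List.pyRepeat "../".toList depth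
    ++ "img/video-placeholder.jpg\">\n</div>".toList)

-- ===== PORT A =====
-- the loop body of A: append the line; after the first '**Author:**' line append '' and video_div, set the flag
def pvStepA (vd : String) (acc : List String × Bool) (line : String) : List String × Bool :=
  let nl := acc.1 ++ [line]
  if PySem.Str.startswith line "**Author:**" && !acc.2 then (nl ++ ["", vd], true) else (nl, acc.2)

def add_video (content : String) (video_id : String) (video_type : String) (depth : Int) : String :=
  let video_div := pvVideoDiv video_id video_type depth
  let lines : List String := (PySem.Chars.splitOn content.toList ['\n']).map String.mk
  let res := lines.foldl (pvStepA video_div) ([], false)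
  PySem.Str.join "\n" res.1

-- ===== PORT B =====
def add_video_alt (content : String) (video_id : String) (video_type : String) (depth : Int) : String :=
  let video_div := pvVideoDiv video_id video_type depth
  let lines : List String := (PySem.Chars.splitOn content.toList ['\n']).map String.mk
  match lines.findIdx? (fun l => PySem.Str.startswith l "**Author:**") with
  | none => PySem.Str.join "\n" lines
  | some i => PySem.Str.join "\n" (lines.take (i + 1) ++ ["", video_div] ++ lines.drop (i + 1))

-- ===== PRECONDITION & SPEC =====
def Spec_add_video (content : String) (video_id : String) (video_type : String) (depth : Int) (out : String) : Prop := out = add_video_alt content video_id video_type depth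
instance (content : String) (video_id : String) (video_type : String) (depth : Int) (out : String) : Decidable (Spec_add_video content video_id video_type depth out) := by unfold Spec_add_video; infer_instance

-- ===== CLAIM (what is proved, stated in full; the proofs are below) =====
def Claim_equal_add_video : Prop := ∀ (content : String) (video_id : String) (video_type : String) (depth : Int), Dom_add_video content video_id video_type depth → Spec_add_video content video_id video_type depth (add_video content video_id video_type depth)

-- ===== LEMMAS AND PROOFS =====

-- once the flag is set, A's loop only appends the remaining lines
lemma foldl_stepA_true (vd : String) : ∀ (ls : List String) (acc : List String),
    ls.foldl (pvStepA vd) (acc, true) = (acc ++ ls, true) := by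
  intro ls
  induction ls with
  | nil => intro acc; simp
  | cons l t ih =>
      intro acc
      simp only [List.foldl_cons, pvStepA, Bool.not_true, Bool.and_false]
      rw [if_neg (by simp), ih]
      simp

-- with the flag unset, the list A's loop builds is the splice at the first matching index
lemma foldl_stepA_false (vd : String) : ∀ (ls : List String) (acc : List String),
    (ls.foldl (pvStepA vd) (acc, false)).1 =
      match ls.findIdx? (fun l => PySem.Str.startswith l "**Author:**") with
      | none => acc ++ ls
      | some i => acc ++ (ls.take (i + 1) ++ ["", vd] ++ ls.drop (i + 1)) := by
  intro ls
  induction ls with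
  | nil => intro acc; simp
  | cons l t ih =>
      intro acc
      rw [List.findIdx?_cons]
      by_cases h : PySem.Str.startswith l "**Author:**" = true
      · simp only [List.foldl_cons, pvStepA, h, Bool.not_false, Bool.and_true]
        rw [if_pos (by simp), if_pos (by simp), foldl_stepA_true]
        simp
      · simp only [List.foldl_cons, pvStepA, Bool.not_false, Bool.and_true]
        rw [if_neg h, if_neg h, ih]
        cases hf : t.findIdx? (fun l => PySem.Str.startswith l "**Author:**") with
        | none => simp [h, hf]
        | some i => simp [h, hf, List.take_succ_cons, List.drop_succ_cons]

-- ===== VERDICT (by name: the statement is the Claim_ definition above) =====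
theorem add_video_spec : Claim_equal_add_video := by
  intro content video_id video_type depth _
  unfold Spec_add_video add_video add_video_alt
  simp only []
  rw [foldl_stepA_false]
  cases hf : ((PySem.Chars.splitOn content.toList ['\n']).map String.mk).findIdx?
      (fun l => PySem.Str.startswith l "**Author:**") with
  | none => simp [hf]
  | some i => simp [hf]
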